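-- pv_equiv track=rewrite | github.com/madmazoku/otus.python.01.01 | poker/poker.py | kind
-- ===== SOURCE A (Python) =====
-- def kind(n, ranks):
--     """Возвращает первый ранг, который n раз встречается в данной руке. Возвращает None, если ничего не найдено"""
--     assert (len(ranks) == 5)
--     kind = {}
--     for r in ranks:
--         if r not in kind:
--             kind[r] = 1
--         else:
--             kind[r] = kind[r] + 1
--     for r in kind:
--         if kind[r] == n:
--             return r
--     return None
-- ===== SOURCE B (Python) =====
-- def kind(n, ranks):
--     """Return the first rank occurring exactly n times in the hand, else None."""
--     assert (len(ranks) == 5)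
--     rest = list(ranks)
--     while rest:
--         r = rest[0]
--         if sum(1 for x in rest if x == r) == n:
--             return r
--         rest = [x for x in rest if x != r]
--     return None
-- ===== Notes on version B (the rewrite author's own statement) =====
-- stated objective: alternative
-- what changed: Replaces the build-a-frequency-dict-then-scan-distinct-keys structure with a group-stripping loop: B repeatedly takes the leading rank of the remaining hand, checks the size of its whole group, and strips that group before continuing, so no frequency index is ever built.
import Mathlib
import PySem

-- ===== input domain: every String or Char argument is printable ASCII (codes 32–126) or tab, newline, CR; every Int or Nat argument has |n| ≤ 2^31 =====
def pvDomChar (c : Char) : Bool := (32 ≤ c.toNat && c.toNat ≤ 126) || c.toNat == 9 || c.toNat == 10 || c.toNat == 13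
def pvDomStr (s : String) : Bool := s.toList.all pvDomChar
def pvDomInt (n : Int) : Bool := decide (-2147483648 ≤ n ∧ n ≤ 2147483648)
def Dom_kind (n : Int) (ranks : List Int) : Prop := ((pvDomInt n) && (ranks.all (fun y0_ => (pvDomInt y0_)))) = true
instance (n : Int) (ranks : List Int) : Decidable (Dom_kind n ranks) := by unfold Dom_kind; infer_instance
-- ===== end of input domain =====

-- B replaces A's frequency-dict index with a group-stripping loop over the remaining hand (objective: alternative).

-- ===== PORT A =====
-- the assert is modelled by Pre_kind; outside it the port returns none
-- kind[r] inside the 'else' branch is exact as getD because d.contains r holds there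
def kind (n : Int) (ranks : List Int) : Option Int :=
  if ranks.length = 5 then
    let d : PySem.Dict Int Int :=
      ranks.foldl
        (fun d r =>
          if d.contains r = false then d.insert r 1
          else d.insert r (d.getD r 0 + 1))
        PySem.Dict.empty
    d.keys.find? (fun r => d.getD r 0 == n)
  else none

-- ===== PORT B =====
-- the while loop over 'rest': check the leading rank's group size, else strip the group
def kindGroups (n : Int) : List Int → Option Int
  | [] => none
  | r :: t =>
    if ((r :: t).foldl (fun acc x => if x == r then acc + 1 else acc) (0 : Int)) == n then
      some r
    else
      kindGroups n ((r :: t).filter (fun x => x != r))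
termination_by xs => xs.length
decreasing_by
  simp only [List.filter_cons, bne_self_eq_false, Bool.false_eq_true, if_false]
  exact Nat.lt_succ_of_le (List.length_filter_le _ _)

def kind_alt (n : Int) (ranks : List Int) : Option Int :=
  if ranks.length = 5 then kindGroups n ranks else none

-- ===== PRECONDITION & SPEC =====
-- A's assert raises AssertionError unless the hand has exactly 5 ranks
def Pre_kind (n : Int) (ranks : List Int) : Prop := ranks.length = 5
instance (n : Int) (ranks : List Int) : Decidable (Pre_kind n ranks) := by unfold Pre_kind; infer_instance
def pvWitness_kind : Int × List Int := (2, [1, 1, 2, 3, 4])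
def Spec_kind (n : Int) (ranks : List Int) (out : Option Int) : Prop := out = kind_alt n ranks
instance (n : Int) (ranks : List Int) (out : Option Int) : Decidable (Spec_kind n ranks out) := by unfold Spec_kind; infer_instance

-- ===== CLAIM (what is proved, stated in full; the proofs are below) =====
def Claim_equal_kind : Prop := ∀ (n : Int) (ranks : List Int), Dom_kind n ranks → Pre_kind n ranks → Spec_kind n ranks (kind n ranks)

-- ===== LEMMAS AND PROOFS =====

-- A's update loop is exactly Counter building: both branches insert getD+1
lemma kind_fold_eq_counter (ranks : List Int) :
    ranks.foldl
      (fun (d : PySem.Dict Int Int) r =>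
        if d.contains r = false then d.insert r 1
        else d.insert r (d.getD r 0 + 1))
      PySem.Dict.empty = PySem.Dict.counter ranks := by
  rw [← PySem.Dict.foldl_insert_getD_add_one_eq_counter]
  apply PySem.List.foldl_congr_mem
  intro d r _
  by_cases h : d.contains r = false
  · simp only [h, if_true]
    have : d.getD r 0 = 0 := by
      simp [PySem.Dict.getD]
      have := PySem.Dict.contains_eq_isSome_get? d r
      rw [h] at this
      cases hg : d.get? r with
      | none => simp
      | some v => rw [hg] at this; simp at this
    rw [this]
    norm_num
  · simp [h]

-- find? over the first-occurrence dedup equals find? over the original list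
lemma find?_foldl_add {α : Type} [BEq α] [LawfulBEq α] (p : α → Bool) (xs acc : List α) :
    List.find? p (xs.foldl PySem.Set.add acc) = (List.find? p acc).or (List.find? p xs) := by
  induction xs generalizing acc with
  | nil => simp
  | cons x xs ih =>
    rw [List.foldl_cons, ih]
    by_cases hmem : PySem.Set.contains acc x = true
    · have hadd : PySem.Set.add acc x = acc := by
        simp [PySem.Set.add, (PySem.Set.contains_iff acc x).mp hmem]
      rw [show PySem.Set.add acc x = acc from hadd]
      cases hf : List.find? p acc with
      | some v => simp
      | none =>
        have hx : p x = false := by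
          have := List.find?_eq_none.mp hf x ((PySem.Set.contains_iff acc x).mp hmem)
          simpa using this
        simp [List.find?, hx]
    · have hadd : PySem.Set.add acc x = acc ++ [x] := by
        have hx : x ∉ acc := fun h => hmem (((PySem.Set.contains_iff acc x).mpr h))
        simp [PySem.Set.add, hx]
      rw [hadd, List.find?_append]
      cases hf : List.find? p acc with
      | some v => simp
      | none =>
        simp only [Option.or, List.find?]
        cases hp : p x <;> simp

lemma find?_ofList {α : Type} [BEq α] [LawfulBEq α] (p : α → Bool) (xs : List α) :
    List.find? p (PySem.Set.ofList xs) = List.find? p xs := by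
  rw [PySem.Set.ofList_eq_foldl, find?_foldl_add]
  simp

-- a predicate that fails on everything equal to r is unaffected by stripping r's group
lemma find?_filter_ne {α : Type} [DecidableEq α] (p : α → Bool) (r : α) (hr : p r = false) :
    ∀ xs : List α, List.find? p (xs.filter (fun x => x != r)) = List.find? p xs := by
  intro xs
  induction xs with
  | nil => rfl
  | cons x t ih =>
    by_cases hx : x = r
    · subst hx
      simp only [List.filter_cons, bne_self_eq_false, List.find?, hr, ih, Bool.false_eq_true,
        if_false]
    · have hbne : (x != r) = true := by simp [hx]
      simp only [List.filter_cons, hbne, List.find?, if_true]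
      cases hp : p x
      · simpa [hp] using ih
      · rfl

-- find? only looks at members
lemma find?_congr_mem {α : Type} (p q : α → Bool) :
    ∀ xs : List α, (∀ x ∈ xs, p x = q x) → List.find? p xs = List.find? q xs := by
  intro xs
  induction xs with
  | nil => intro _; rfl
  | cons x t ih =>
    intro h
    have hx := h x (List.mem_cons_self ..)
    simp only [List.find?, hx]
    cases q x
    · exact ih fun y hy => h y (List.mem_cons_of_mem _ hy)
    · rfl

-- the group-stripping loop computes the first-match-by-count scan
lemma kindGroups_eq (n : Int) : ∀ xs : List Int,
    kindGroups n xs = xs.find? (fun r => ((PySem.List.count xs r : Int) == n)) := by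
  intro xs
  induction hL : xs.length using Nat.strong_induction_on generalizing xs with
  | _ L ih =>
    cases xs with
    | nil => simp only [kindGroups]; rfl
    | cons r t =>
      rw [kindGroups.eq_def]
      simp only []
      have hcnt : ((r :: t).foldl (fun acc x => if x == r then acc + 1 else acc) (0 : Int))
          = (PySem.List.count (r :: t) r : Int) := by
        rw [PySem.List.foldl_beq_add_one, PySem.List.count_eq]
        ring
      rw [hcnt]
      by_cases hn : ((PySem.List.count (r :: t) r : Int) == n) = true
      · simp only [if_true, List.find?, hn]
      · have hn' : ((PySem.List.count (r :: t) r : Int) == n) = false := by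
          simpa using hn
        simp only [hn, if_false, Bool.false_eq_true]
        set xs' := (r :: t).filter (fun x => x != r) with hxs'
        have hlen : xs'.length < L := by
          rw [← hL, hxs']
          simp only [List.filter_cons, bne_self_eq_false, Bool.false_eq_true, if_false]
          exact Nat.lt_succ_of_le (List.length_filter_le _ _)
        rw [ih xs'.length hlen xs' rfl]
        have hq : List.find? (fun a => ((PySem.List.count xs' a : Int) == n)) xs'
            = List.find? (fun a => ((PySem.List.count (r :: t) a : Int) == n)) xs' := by
          apply find?_congr_mem
          intro x hx
          have hxr : x ≠ r := by
            have := List.of_mem_filter hx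
            simpa using this
          have : PySem.List.count xs' x = PySem.List.count (r :: t) x := by
            simp only [PySem.List.count_eq, hxs']
            rw [List.count_filter]
            simp [hxr]
          rw [this]
        rw [hq, hxs', find?_filter_ne _ r hn']

-- ===== VERDICT (by name: the statement is the Claim_ definition above) =====
theorem kind_spec : Claim_equal_kind := by
  intro n ranks _ hpre
  have h5 : ranks.length = 5 := hpre
  unfold Spec_kind kind kind_alt
  rw [if_pos h5, if_pos h5, kind_fold_eq_counter, kindGroups_eq]
  show List.find? (fun r => (PySem.Dict.counter ranks).getD r 0 == n) (PySem.Dict.counter ranks).keys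
    = List.find? (fun r => ((PySem.List.count ranks r : Int) == n)) ranks
  rw [PySem.Dict.keys_counter]
  have hpred : (fun r => PySem.Dict.getD (PySem.Dict.counter ranks) r 0 == n)
      = (fun r => ((PySem.List.count ranks r : Int) == n)) := by
    funext r
    rw [PySem.Dict.getD_counter, PySem.List.count_eq]
  rw [hpred, find?_ofList]
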